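-- pv_equiv track=rewrite | github.com/Grimakis/model100-basic-tools-python | src/pack_basic.py | remove_trailing_quote
-- ===== SOURCE A (Python) =====
-- def remove_trailing_quote(line):
--     """Remove trailing quote from string at end of line (Model 100 BASIC optimization).
--
--     In Model 100 BASIC, closing quotes at end of line are optional.
--     ROM2 removes them to save bytes.
--     """
--     if not line:
--         return line
--
--     # Check if line ends with a string (closing quote)
--     if not line.rstrip().endswith('"'):
--         return line
--
--     # Find the last quote and check if it's a closing quote (even position in pair)
--     in_string = False
--     last_open_quote = -1
--
--     for i, char in enumerate(line):
--         if char == '"':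
--             if not in_string:
--                 last_open_quote = i
--             in_string = not in_string
--
--     # If we're not in a string at the end (meaning last quote was closing), remove it
--     if not in_string and line.rstrip().endswith('"'):
--         # Remove the trailing quote
--         line = line.rstrip()
--         return line[:-1]
--
--     return line
-- ===== SOURCE B (Python) =====
-- def remove_trailing_quote(line):
--     """Remove trailing quote from string at end of line (Model 100 BASIC optimization)."""
--     if not line:
--         return line
--     parts = line.rstrip().split('"')
--     if len(parts) < 2 or parts[-1] != '':
--         return line
--     if len(parts) % 2 == 1:
--         return '"'.join(parts[:-1])
--     return line
-- ===== Notes on version B (the rewrite author's own statement) =====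
-- stated objective: alternative
-- what changed: Replaces A's stateful in_string/last_open_quote character scan with a segmentation approach: split the stripped line at quote characters into quote-free segments, decide from the segment list's shape (last segment empty, odd segment count), and rebuild the result by joining all but the last segment.
import Mathlib
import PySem

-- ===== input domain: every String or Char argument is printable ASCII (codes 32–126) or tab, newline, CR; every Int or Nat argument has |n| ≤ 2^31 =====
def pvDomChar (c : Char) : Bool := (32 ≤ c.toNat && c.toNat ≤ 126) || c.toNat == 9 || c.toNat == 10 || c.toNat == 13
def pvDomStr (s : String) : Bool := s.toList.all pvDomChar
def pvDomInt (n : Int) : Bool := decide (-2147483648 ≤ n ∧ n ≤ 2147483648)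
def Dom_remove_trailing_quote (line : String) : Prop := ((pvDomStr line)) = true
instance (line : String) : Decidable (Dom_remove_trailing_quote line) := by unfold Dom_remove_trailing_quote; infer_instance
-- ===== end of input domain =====

-- B replaces A's stateful in_string character scan with a split-on-quote segmentation: the stripped
-- line is cut into quote-free segments, the segment list's shape (last segment empty, odd segment
-- count) decides, and the result is rebuilt by joining all but the last segment; objective: alternative.

-- ===== PORT A =====
-- literal port of A: enumerate loop maintaining (in_string, last_open_quote)
def remove_trailing_quote (line : String) : String :=
  if line = "" then line
  else if ¬ PySem.Str.endswith (PySem.Str.rstrip line) "\"" then line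
  else
    let st := (PySem.List.enumerate line.toList 0).foldl
      (fun (s : Bool × Int) ic =>
        if ic.2 = '"' then (!s.1, if !s.1 then ic.1 else s.2) else s)
      (false, -1)
    if !st.1 && PySem.Str.endswith (PySem.Str.rstrip line) "\"" then
      PySem.Str.slice (PySem.Str.rstrip line) none (some (-1))
    else line

-- ===== PORT B =====
-- port of Source B at char level: split the stripped line on '"', decide by the segment list,
-- rebuild by joining all but the last (empty) segment
def remove_trailing_quote_alt (line : String) : String :=
  if line = "" then line
  else
    let parts := PySem.Chars.splitOn (PySem.Chars.rstrip line.toList) ['"']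
    if parts.length < 2 ∨ PySem.List.pyGet? parts (-1) ≠ some [] then line
    else if parts.length % 2 = 1 then
      String.ofList (PySem.Chars.join ['"'] (PySem.List.slice parts none (some (-1))))
    else line

-- ===== PRECONDITION & SPEC =====
def Spec_remove_trailing_quote (line : String) (out : String) : Prop := out = remove_trailing_quote_alt line
instance (line : String) (out : String) : Decidable (Spec_remove_trailing_quote line out) := by unfold Spec_remove_trailing_quote; infer_instance

-- ===== CLAIM (what is proved, stated in full; the proofs are below) =====
def Claim_equal_remove_trailing_quote : Prop := ∀ (line : String), Dom_remove_trailing_quote line → Spec_remove_trailing_quote line (remove_trailing_quote line)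

-- ===== LEMMAS AND PROOFS =====

-- structural model of splitOn with the single-char separator '"'
def pvSplit1 (pre : List Char) : List Char → List (List Char)
  | [] => [pre]
  | c :: rest => if c = '"' then pre :: pvSplit1 [] rest else pvSplit1 (pre ++ [c]) rest

theorem pvSplit1_ne_nil (pre : List Char) (l : List Char) : pvSplit1 pre l ≠ [] := by
  induction l generalizing pre with
  | nil => simp [pvSplit1]
  | cons c rest ih =>
    simp only [pvSplit1]
    split_ifs
    · simp
    · exact ih _

theorem go_eq_pvSplit1 (l : List Char) (fuel : Nat) (cur : List Char) (acc : List (List Char))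
    (h : l.length ≤ fuel) :
    PySem.Chars.splitOn.go ['"'] fuel l cur acc = acc.reverse ++ pvSplit1 cur.reverse l := by
  induction l generalizing fuel cur acc with
  | nil => cases fuel <;> simp [PySem.Chars.splitOn.go, pvSplit1]
  | cons c rest ih =>
    cases fuel with
    | zero => simp at h
    | succ n =>
      simp only [PySem.Chars.splitOn.go]
      by_cases hc : c = '"'
      · subst hc
        rw [if_pos (by simp [List.isPrefixOf])]
        simp only [List.length_cons] at h
        have hdrop : List.drop ['"'].length ('"' :: rest) = rest := rfl
        rw [hdrop, ih n [] (cur.reverse :: acc) (by omega)]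
        simp [pvSplit1]
      · rw [if_neg (by simp [List.isPrefixOf]; exact Ne.symm hc)]
        simp only [List.length_cons] at h
        rw [ih n (c :: cur) acc (by omega)]
        simp [pvSplit1, hc]

theorem splitOn_eq_pvSplit1 (cs : List Char) :
    PySem.Chars.splitOn cs ['"'] = pvSplit1 [] cs := by
  have := go_eq_pvSplit1 cs (cs.length + 1) [] [] (by omega)
  simpa [PySem.Chars.splitOn] using this

theorem length_pvSplit1 (l : List Char) (pre : List Char) :
    (pvSplit1 pre l).length = l.count '"' + 1 := by
  induction l generalizing pre with
  | nil => simp [pvSplit1]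
  | cons c rest ih =>
    simp only [pvSplit1]
    by_cases hc : c = '"'
    · subst hc; simp [ih]
    · simp [hc, ih]

theorem join_cons_cons (x y : List Char) (l : List (List Char)) :
    PySem.Chars.join ['"'] (x :: y :: l) = x ++ ['"'] ++ PySem.Chars.join ['"'] (y :: l) := by
  simp [PySem.Chars.join, List.intercalate]

theorem join_pvSplit1 (l : List Char) (pre : List Char) :
    PySem.Chars.join ['"'] (pvSplit1 pre l) = pre ++ l := by
  induction l generalizing pre with
  | nil => simp [pvSplit1, PySem.Chars.join, List.intercalate]
  | cons c rest ih =>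
    simp only [pvSplit1]
    by_cases hc : c = '"'
    · subst hc
      rw [if_pos rfl]
      obtain ⟨q, qs, hq⟩ : ∃ q qs, pvSplit1 ([] : List Char) rest = q :: qs := by
        cases hps : pvSplit1 ([] : List Char) rest with
        | nil => exact absurd hps (pvSplit1_ne_nil _ _)
        | cons q qs => exact ⟨q, qs, rfl⟩
      have ihr := ih ([] : List Char)
      rw [hq] at ihr ⊢
      rw [join_cons_cons, ihr]
      simp
    · rw [if_neg hc, ih]
      simp

theorem getLast?_pvSplit1 (l : List Char) (pre : List Char) :
    (pvSplit1 pre l).getLast? = some [] ↔ ((l = [] ∧ pre = []) ∨ l.getLast? = some '"') := by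
  induction l generalizing pre with
  | nil => simp [pvSplit1]
  | cons c rest ih =>
    simp only [pvSplit1]
    by_cases hc : c = '"'
    · subst hc
      rw [if_pos rfl]
      obtain ⟨q, qs, hq⟩ : ∃ q qs, pvSplit1 ([] : List Char) rest = q :: qs := by
        cases hps : pvSplit1 ([] : List Char) rest with
        | nil => exact absurd hps (pvSplit1_ne_nil _ _)
        | cons q qs => exact ⟨q, qs, rfl⟩
      rw [hq, List.getLast?_cons_cons, ← hq, ih]
      cases rest with
      | nil => simp
      | cons d ds => simp [List.getLast?_cons_cons]
    · rw [if_neg hc, ih]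
      cases rest with
      | nil => simp [hc]
      | cons d ds => simp [List.getLast?_cons_cons]

-- joining with a trailing empty segment appends one quote
theorem join_concat_nil (ps : List (List Char)) (h : ps ≠ []) :
    PySem.Chars.join ['"'] (ps ++ [[]]) = PySem.Chars.join ['"'] ps ++ ['"'] := by
  induction ps with
  | nil => simp at h
  | cons p t ih =>
    cases t with
    | nil => simp [PySem.Chars.join, List.intercalate]
    | cons q ts =>
      have ih' := ih (by simp)
      rw [List.cons_append] at ih'
      rw [List.cons_append, List.cons_append, join_cons_cons, ih', join_cons_cons]
      simp

-- quote count survives rstrip ('"' is not whitespace)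
theorem count_rstrip (cs : List Char) :
    (PySem.Chars.rstrip cs).count '"' = cs.count '"' := by
  unfold PySem.Chars.rstrip
  rw [List.count_reverse]
  conv_rhs => rw [← List.count_reverse (l := cs),
    ← List.takeWhile_append_dropWhile (p := PySem.Chars.isspace) (l := cs.reverse)]
  rw [List.count_append]
  have h0 : (List.takeWhile PySem.Chars.isspace cs.reverse).count '"' = 0 := by
    rw [List.count_eq_zero]
    intro hmem
    have := List.mem_takeWhile_imp hmem
    simp [PySem.Chars.isspace] at this
  omega

-- s ends with '"' iff its last char is '"'
theorem endswith_quote_iff (s : List Char) :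
    PySem.Chars.endswith s ['"'] = true ↔ s.getLast? = some '"' := by
  rw [PySem.Chars.endswith_iff, List.getLast?_eq_some_iff]
  constructor
  · rintro ⟨t, ht⟩; exact ⟨t, ht.symm⟩
  · rintro ⟨t, ht⟩; exact ⟨t, ht.symm⟩

-- the in_string component of A's fold is the parity of the quote count
theorem fold_fst_parity (l : List Char) (k : Int) (b : Bool) (q : Int) :
    ((PySem.List.enumerate l k).foldl
      (fun (s : Bool × Int) ic =>
        if ic.2 = '\"' then (!s.1, if s.1 = false then ic.1 else s.2) else s)
      (b, q)).1 = (b ^^ decide (l.count '\"' % 2 = 1)) := by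
  induction l generalizing k b q with
  | nil => simp [PySem.List.enumerate_nil]
  | cons x t ih =>
    rw [PySem.List.enumerate_cons, List.foldl_cons]
    by_cases hx : x = '\"'
    · subst hx
      beta_reduce
      rw [if_pos rfl, ih]
      simp only [List.count_cons]
      rcases Nat.even_or_odd (t.count '\"') with he | ho
      · have h1 : t.count '\"' % 2 = 0 := Nat.even_iff.mp he
        have h2 : (t.count '\"' + 1) % 2 = 1 := by omega
        simp [h1, h2]
      · have h1 : t.count '\"' % 2 = 1 := Nat.odd_iff.mp ho
        have h2 : (t.count '\"' + 1) % 2 = 0 := by omega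
        simp [h1, h2]
    · rw [if_neg hx, ih]
      simp [hx]

-- ===== VERDICT (by name: the statement is the Claim_ definition above) =====
theorem remove_trailing_quote_spec : Claim_equal_remove_trailing_quote := by
  intro line _
  unfold Spec_remove_trailing_quote
  by_cases h0 : line = ""
  · simp [remove_trailing_quote, remove_trailing_quote_alt, h0]
  by_cases he : PySem.Chars.endswith (PySem.Chars.rstrip line.toList) ['"'] = true
  case neg =>
    -- A returns line at its second guard; B's segment-shape guard also fires
    have hlast : (PySem.Chars.rstrip line.toList).getLast? ≠ some '"' := fun h =>
      he ((endswith_quote_iff _).mpr h)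
    have hguard : (pvSplit1 [] (PySem.Chars.rstrip line.toList)).length < 2 ∨
        PySem.List.pyGet? (pvSplit1 [] (PySem.Chars.rstrip line.toList)) (-1) ≠ some [] := by
      by_cases hnil : PySem.Chars.rstrip line.toList = []
      · left; rw [hnil]; simp [pvSplit1]
      · right
        simp only [PySem.List.pyGet?_neg_one, Ne, getLast?_pvSplit1]
        rintro (⟨h1, -⟩ | h2)
        · exact hnil h1
        · exact hlast h2
    have hA : remove_trailing_quote line = line := by
      unfold remove_trailing_quote
      simp [h0, he]
    have hB : remove_trailing_quote_alt line = line := by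
      unfold remove_trailing_quote_alt
      rw [if_neg h0]
      simp only [splitOn_eq_pvSplit1]
      rw [if_pos hguard]
    rw [hA, hB]
  case pos =>
    have hlastq : (PySem.Chars.rstrip line.toList).getLast? = some '"' :=
      (endswith_quote_iff _).mp he
    have hmem : '"' ∈ PySem.Chars.rstrip line.toList := by
      obtain ⟨ys, hy⟩ := List.getLast?_eq_some_iff.mp hlastq
      rw [hy]; simp
    have hcnt : 1 ≤ (PySem.Chars.rstrip line.toList).count '"' := List.count_pos_iff.mpr hmem
    have hlen := length_pvSplit1 (PySem.Chars.rstrip line.toList) []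
    have hgl : (pvSplit1 [] (PySem.Chars.rstrip line.toList)).getLast? = some [] :=
      (getLast?_pvSplit1 _ _).mpr (Or.inr hlastq)
    have hguard : ¬ ((pvSplit1 [] (PySem.Chars.rstrip line.toList)).length < 2 ∨
        PySem.List.pyGet? (pvSplit1 [] (PySem.Chars.rstrip line.toList)) (-1) ≠ some []) := by
      rintro (hlt | hne)
      · omega
      · exact hne (by rw [PySem.List.pyGet?_neg_one, hgl])
    have hcline : line.toList.count '"' = (PySem.Chars.rstrip line.toList).count '"' :=
      (count_rstrip line.toList).symm
    by_cases hp : line.toList.count '"' % 2 = 0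
    · -- even quote count: both strip the trailing quote
      have hparA : ¬ line.toList.count '"' % 2 = 1 := by omega
      have hparB : (pvSplit1 [] (PySem.Chars.rstrip line.toList)).length % 2 = 1 := by omega
      obtain ⟨ys, hy⟩ := List.getLast?_eq_some_iff.mp hgl
      have hysne : ys ≠ [] := by
        intro h
        rw [hy, h] at hlen
        simp at hlen
        omega
      have hjoin : PySem.Chars.join ['"'] ys ++ ['"'] = PySem.Chars.rstrip line.toList := by
        rw [← join_concat_nil ys hysne, ← hy, join_pvSplit1]
        simp
      have hslice : PySem.List.slice (pvSplit1 [] (PySem.Chars.rstrip line.toList)) none (some (-1)) = ys := by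
        rw [PySem.List.slice_to_neg_one, hy, List.dropLast_concat]
      have hA : remove_trailing_quote line = PySem.Str.slice (PySem.Str.rstrip line) none (some (-1)) := by
        unfold remove_trailing_quote
        simp [h0, he, fold_fst_parity, hparA]
      have hB : remove_trailing_quote_alt line = String.ofList (PySem.Chars.join ['"'] ys) := by
        unfold remove_trailing_quote_alt
        rw [if_neg h0]
        simp only [splitOn_eq_pvSplit1]
        rw [if_neg hguard, if_pos hparB, hslice]
      rw [hA, hB]
      apply String.toList_injective
      rw [PySem.Str.slice_to_neg_one, String.toList_ofList, PySem.Str.toList_rstrip,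
        ← hjoin, List.dropLast_concat]
    · -- odd quote count: both keep the line
      have hparA : line.toList.count '"' % 2 = 1 := by omega
      have hparB : ¬ (pvSplit1 [] (PySem.Chars.rstrip line.toList)).length % 2 = 1 := by omega
      have hA : remove_trailing_quote line = line := by
        unfold remove_trailing_quote
        simp [h0, he, fold_fst_parity, hparA]
      have hB : remove_trailing_quote_alt line = line := by
        unfold remove_trailing_quote_alt
        rw [if_neg h0]
        simp only [splitOn_eq_pvSplit1]
        rw [if_neg hguard, if_neg hparB]
      rw [hA, hB]
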